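-- pv_equiv track=rewrite | github.com/nima-farnoodian/Sequence_Mining- | topk_spade.py | vertical_finding
-- ===== SOURCE A (Python) =====
-- def vertical_finding(vr,left_vr,right_item):
--     """This function is used to find the sequence using vertical representation (Sparse Lattice suggested in Zaki's paper)"""
--
--     '''
--     Input:
--         vertical representation provided by Dataset_Sequence class
--         left: vertical representation of the prefix e.g, AB
--         right_item= the candidate item added to the prefix e.g, C
--
--     Output:
--         res= vertical representation of the prefix + right_item  e.g, ABC
--         support= the support of the found sequence
--     '''
--     right_item=tuple(right_item)
--     right=vr.get(right_item,dict())
--     res={}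
--     support=0
--     for x in left_vr:
--         if x in right:
--             break_Flage=False
--             for loc_left in left_vr[x]:
--                 if break_Flage==False:
--                     for loc_right in right[x]:
--                         if loc_left<loc_right:
--                             if x not in res:
--                                 res[x]=[]
--                             res[x].append(loc_right)
--                             support+=1
--                             break_Flage=True
--                             break
--                 else:
--                     break
--     return res,support
-- ===== SOURCE B (Python) =====
-- def vertical_finding(vr, left_vr, right_item):
--     # B: per item x, two independent linear scans (max of right list, then first
--     # qualifying left/right positions) instead of a nested left-by-right scan.
--     right = vr.get(tuple(right_item), {})
--     res = {}
--     support = 0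
--     for x, lefts in left_vr.items():
--         rights = right.get(x)
--         if not rights:
--             continue
--         m = max(rights)
--         loc_left = next((l for l in lefts if l < m), None)
--         if loc_left is None:
--             continue
--         res[x] = [next(r for r in rights if loc_left < r)]
--         support += 1
--     return res, support
-- ===== Notes on version B (the rewrite author's own statement) =====
-- stated objective: alternative
-- what changed: Per item x, A scans every right-position for each left-position until a match; B computes max(rights) once, then finds the first left-position below it and the first right-position above that in two independent single scans (worst-case O(L_x+R_x) per item vs A's O(L_x*R_x), though A's early break makes them comparable on random data).
import Mathlib
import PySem

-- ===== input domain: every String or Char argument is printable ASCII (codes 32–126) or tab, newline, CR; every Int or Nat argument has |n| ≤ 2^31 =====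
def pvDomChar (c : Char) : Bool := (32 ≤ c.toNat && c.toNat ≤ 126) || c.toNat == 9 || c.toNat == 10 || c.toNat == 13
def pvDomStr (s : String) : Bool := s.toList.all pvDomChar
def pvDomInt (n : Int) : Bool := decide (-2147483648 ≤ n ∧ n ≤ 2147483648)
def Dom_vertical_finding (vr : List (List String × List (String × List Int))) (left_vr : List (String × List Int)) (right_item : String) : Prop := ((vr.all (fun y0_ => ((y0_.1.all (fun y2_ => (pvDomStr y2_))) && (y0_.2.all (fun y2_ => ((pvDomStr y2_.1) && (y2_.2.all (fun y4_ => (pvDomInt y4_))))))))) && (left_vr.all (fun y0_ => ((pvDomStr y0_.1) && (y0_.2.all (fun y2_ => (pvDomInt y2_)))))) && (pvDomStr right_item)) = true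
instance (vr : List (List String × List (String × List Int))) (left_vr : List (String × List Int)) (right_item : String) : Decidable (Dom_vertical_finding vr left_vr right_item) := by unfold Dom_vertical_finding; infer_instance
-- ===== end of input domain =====

-- B replaces A's nested scan (every left position against every right position) by, per item x,
-- a max of the right list followed by two independent single scans; same result, different algorithm.

-- ===== PORT A =====
-- inner 'for loc_right in right[x]: if loc_left < loc_right: … break'
def vfA_inner (loc_left : Int) : List Int → Option Int
  | [] => none
  | r :: rs => if loc_left < r then some r else vfA_inner loc_left rs

-- 'for loc_left in left_vr[x]' with break_Flage: stop at the first loc_left whose inner scan hits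
def vfA_outer (lefts rights : List Int) : Option Int :=
  match lefts with
  | [] => none
  | l :: ls =>
    match vfA_inner l rights with
    | some r => some r
    | none => vfA_outer ls rights

-- 'for x in left_vr: if x in right: …' accumulating res and support
-- ('if x not in res: res[x] = []' + 'res[x].append(loc_right)' is dict modify with default [])
def vfA_loop (rd : PySem.Dict String (List Int)) (pairs : List (String × List Int))
    (res : PySem.Dict String (List Int)) (support : Int) : (List (String × List Int)) × Int :=
  match pairs with
  | [] => (res.items, support)
  | (x, lefts) :: rest =>
    match PySem.Dict.get? rd x with
    | none => vfA_loop rd rest res support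
    | some rights =>
      match vfA_outer lefts rights with
      | none => vfA_loop rd rest res support
      | some r => vfA_loop rd rest (res.modify x [] (fun v => v ++ [r])) (support + 1)

def vertical_finding (vr : List (List String × List (String × List Int))) (left_vr : List (String × List Int)) (right_item : String) : (List (String × List Int)) × Int :=
  -- right_item = tuple(right_item); right = vr.get(right_item, dict())
  let key := right_item.toList.map (fun c => String.ofList [c])
  let right := (PySem.Dict.get? ⟨vr⟩ key).getD []
  vfA_loop ⟨right⟩ left_vr ⟨[]⟩ 0

-- ===== PORT B =====
def vfB_loop (rd : PySem.Dict String (List Int)) (pairs : List (String × List Int))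
    (res : PySem.Dict String (List Int)) (support : Int) : (List (String × List Int)) × Int :=
  match pairs with
  | [] => (res.items, support)
  | (x, lefts) :: rest =>
    match PySem.Dict.get? rd x with
    | none => vfB_loop rd rest res support                 -- rights is None: 'if not rights: continue'
    | some rights =>
      if rights.isEmpty then vfB_loop rd rest res support  -- rights == []: 'if not rights: continue'
      else
        match PySem.List.max? rights (fun y => y) with     -- m = max(rights)
        | none => vfB_loop rd rest res support             -- unreachable: rights nonempty
        | some m =>
          match lefts.find? (fun l => decide (l < m)) with   -- next((l for l in lefts if l < m), None)
          | none => vfB_loop rd rest res support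
          | some l =>
            match rights.find? (fun r => decide (l < r)) with  -- next(r for r in rights if loc_left < r)
            | none => vfB_loop rd rest res support         -- unreachable: l < m = max(rights)
            | some r => vfB_loop rd rest (res.insert x [r]) (support + 1)

def vertical_finding_alt (vr : List (List String × List (String × List Int))) (left_vr : List (String × List Int)) (right_item : String) : (List (String × List Int)) × Int :=
  let key := right_item.toList.map (fun c => String.ofList [c])
  let right := (PySem.Dict.get? ⟨vr⟩ key).getD []
  vfB_loop ⟨right⟩ left_vr ⟨[]⟩ 0

-- ===== PRECONDITION & SPEC =====
-- left_vr is a Python dict, so its keys are distinct; Pre_ states just that (it excludes only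
-- duplicate-key association lists, which no Python input produces).
def Pre_vertical_finding (vr : List (List String × List (String × List Int))) (left_vr : List (String × List Int)) (right_item : String) : Prop :=
  (left_vr.map Prod.fst).Nodup
instance (vr : List (List String × List (String × List Int))) (left_vr : List (String × List Int)) (right_item : String) : Decidable (Pre_vertical_finding vr left_vr right_item) := by unfold Pre_vertical_finding; infer_instance
def pvWitness_vertical_finding : (List (List String × List (String × List Int))) × (List (String × List Int)) × String :=
  ([(["a"], [("b", [1, 3])])], [("b", [0, 2]), ("c", [5])], "a")

def Spec_vertical_finding (vr : List (List String × List (String × List Int))) (left_vr : List (String × List Int)) (right_item : String) (out : (List (String × List Int)) × Int) : Prop := out = vertical_finding_alt vr left_vr right_item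
instance (vr : List (List String × List (String × List Int))) (left_vr : List (String × List Int)) (right_item : String) (out : (List (String × List Int)) × Int) : Decidable (Spec_vertical_finding vr left_vr right_item out) := by unfold Spec_vertical_finding; infer_instance

-- ===== CLAIM (what is proved, stated in full; the proofs are below) =====
def Claim_equal_vertical_finding : Prop := ∀ (vr : List (List String × List (String × List Int))) (left_vr : List (String × List Int)) (right_item : String), Dom_vertical_finding vr left_vr right_item → Pre_vertical_finding vr left_vr right_item → Spec_vertical_finding vr left_vr right_item (vertical_finding vr left_vr right_item)

-- ===== LEMMAS AND PROOFS =====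

theorem vfA_inner_eq_find? (l : Int) (rs : List Int) :
    vfA_inner l rs = rs.find? (fun r => decide (l < r)) := by
  induction rs with
  | nil => rfl
  | cons r rs ih =>
    by_cases h : l < r <;> simp [vfA_inner, List.find?, h, ih]

theorem vfA_outer_nil (lefts : List Int) : vfA_outer lefts [] = none := by
  induction lefts with
  | nil => rfl
  | cons l ls ih => simp [vfA_outer, vfA_inner, ih]

-- the heart: A's nested scan equals B's max-then-two-scans, per item
theorem vfA_outer_eq_probe (lefts rights : List Int) (m : Int)
    (hm : PySem.List.max? rights (fun y => y) = some m) :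
    vfA_outer lefts rights =
      match lefts.find? (fun l => decide (l < m)) with
      | none => none
      | some l => rights.find? (fun r => decide (l < r)) := by
  induction lefts with
  | nil => rfl
  | cons l ls ih =>
    rw [vfA_outer, vfA_inner_eq_find?]
    cases hf : rights.find? (fun r => decide (l < r)) with
    | some r =>
      have hr : r ∈ rights := List.mem_of_find?_eq_some hf
      have hlr : l < r := by simpa using List.find?_some hf
      have hlm : l < m := lt_of_lt_of_le hlr (PySem.List.max?_isMax hm r hr)
      simp [List.find?, hlm, hf]
    | none =>
      have hmem : m ∈ rights := PySem.List.max?_mem hm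
      have : ¬ l < m := by
        have := List.find?_eq_none.mp hf m hmem
        simpa using this
      simp [List.find?, this, ih]

theorem modify_fresh (d : PySem.Dict String (List Int)) (x : String) (r : Int)
    (h : d.contains x = false) :
    d.modify x [] (fun v => v ++ [r]) = d.insert x [r] := by
  simp [PySem.Dict.modify, PySem.Dict.getD_of_not_contains d [] h]

theorem loops_eq (rd : PySem.Dict String (List Int)) (pairs : List (String × List Int))
    (res : PySem.Dict String (List Int)) (support : Int)
    (hnd : (pairs.map Prod.fst).Nodup)
    (hfresh : ∀ k ∈ pairs.map Prod.fst, res.contains k = false) :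
    vfA_loop rd pairs res support = vfB_loop rd pairs res support := by
  induction pairs generalizing res support with
  | nil => rfl
  | cons p rest ih =>
    obtain ⟨x, lefts⟩ := p
    simp only [List.map_cons, List.nodup_cons] at hnd
    have hx : res.contains x = false := hfresh x (by simp)
    have hfresh' : ∀ k ∈ rest.map Prod.fst, res.contains k = false :=
      fun k hk => hfresh k (by simp [hk])
    have hfreshIns : ∀ r : Int, ∀ k ∈ rest.map Prod.fst,
        (res.insert x [r]).contains k = false := by
      intro r k hk
      rw [PySem.Dict.contains_insert]
      have hne : k ≠ x := fun he => hnd.1 (he ▸ hk)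
      simp [hne, hfresh' k hk]
    cases hg : PySem.Dict.get? rd x with
    | none => rw [vfA_loop, vfB_loop]; simp only [hg]; exact ih res support hnd.2 hfresh'
    | some rights =>
      rw [vfA_loop, vfB_loop]; simp only [hg]
      by_cases hemp : rights = []
      · subst hemp
        simp only [vfA_outer_nil, List.isEmpty_nil, if_true]
        exact ih res support hnd.2 hfresh'
      · cases hm : PySem.List.max? rights (fun y => y) with
        | none => exact absurd (PySem.List.max?_eq_none_iff rights _ |>.mp hm) hemp
        | some m =>
          rw [vfA_outer_eq_probe lefts rights m hm,
            if_neg (show ¬rights.isEmpty = true by simp [hemp])]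
          dsimp only
          cases hf : lefts.find? (fun l => decide (l < m)) with
          | none => dsimp only; exact ih res support hnd.2 hfresh'
          | some l =>
            dsimp only
            cases hf2 : rights.find? (fun r => decide (l < r)) with
            | none =>
              -- unreachable (l < m = max rights), but both sides just recurse anyway
              have hlm : l < m := by simpa using List.find?_some hf
              exact absurd hlm (by simpa using
                List.find?_eq_none.mp hf2 m (PySem.List.max?_mem hm))
            | some r =>
              dsimp only
              rw [modify_fresh res x r hx]
              exact ih _ _ hnd.2 (hfreshIns r)

-- ===== VERDICT (by name: the statement is the Claim_ definition above) =====
theorem vertical_finding_spec : Claim_equal_vertical_finding := by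
  intro vr left_vr right_item _hdom hpre
  unfold Spec_vertical_finding vertical_finding vertical_finding_alt
  exact loops_eq _ left_vr _ 0 hpre (fun k _ => rfl)
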